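-- pv_equiv track=rewrite | github.com/btrzcinski/AdventOfCode | AdventOfCode/Day20.py | lowest_numbered_house_to_get_presents
-- ===== SOURCE A (Python) =====
-- def lowest_numbered_house_to_get_presents(num_presents, elf_house_limit=None, elf_gift_multiplier=10):
--     houses = [0] * ((num_presents // elf_gift_multiplier) // 2)
--     lowest_index = len(houses)
--     for elf_num in range(1, len(houses)+1):
--         if elf_house_limit is None: elf_house_max = len(houses)
--         else: elf_house_max = min(len(houses), (elf_num-1) + (elf_num * elf_house_limit))
--         for house_index in range(elf_num-1, elf_house_max, elf_num):
--             houses[house_index] += (elf_num * elf_gift_multiplier)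
--             if houses[house_index] >= num_presents and house_index < lowest_index:
--                 lowest_index = house_index
--     return lowest_index + 1
-- ===== SOURCE B (Python) =====
-- def lowest_numbered_house_to_get_presents(num_presents, elf_house_limit=None, elf_gift_multiplier=10):
--     cap = max(0, (num_presents // elf_gift_multiplier) // 2)
--     for house in range(1, cap + 1):
--         presents = sum(elf * elf_gift_multiplier
--                        for elf in range(1, house + 1)
--                        if house % elf == 0
--                        and (elf_house_limit is None or house // elf <= elf_house_limit))
--         if presents >= num_presents:
--             return house
--     return cap + 1
-- ===== Notes on version B (the rewrite author's own statement) =====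
-- stated objective: alternative
-- what changed: Replaces A's multiplicative elf sieve over a shared mutable houses array with a running minimum by an independent per-house trial-division divisor sum with an early return at the first qualifying house.
-- outside the precondition, e.g. on lowest_numbered_house_to_get_presents(-9, 0, -2): A returns 3, B returns 1; on lowest_numbered_house_to_get_presents(100, None, 0): A raises ZeroDivisionError, B raises ZeroDivisionError
import Mathlib
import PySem

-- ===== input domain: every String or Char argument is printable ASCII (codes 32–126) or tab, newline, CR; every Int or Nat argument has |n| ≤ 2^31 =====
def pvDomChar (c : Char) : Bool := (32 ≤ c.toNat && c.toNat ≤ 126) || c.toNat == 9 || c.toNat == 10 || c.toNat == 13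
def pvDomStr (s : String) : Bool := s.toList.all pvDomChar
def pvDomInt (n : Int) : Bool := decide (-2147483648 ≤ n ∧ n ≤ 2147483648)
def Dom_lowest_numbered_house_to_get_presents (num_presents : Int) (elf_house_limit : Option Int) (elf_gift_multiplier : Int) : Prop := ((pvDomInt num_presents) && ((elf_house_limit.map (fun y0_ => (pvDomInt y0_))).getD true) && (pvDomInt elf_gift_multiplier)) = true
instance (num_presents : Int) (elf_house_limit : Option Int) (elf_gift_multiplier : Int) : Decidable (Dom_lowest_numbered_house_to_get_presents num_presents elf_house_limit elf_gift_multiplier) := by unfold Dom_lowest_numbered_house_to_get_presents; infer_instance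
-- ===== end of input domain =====

-- B replaces A's multiplicative elf sieve (shared mutable houses array + running minimum) by an
-- independent per-house divisor scan with an early return; same return value on Pre_ (objective: alternative).

-- ===== PORT A =====
-- inner loop body: 'houses[house_index] += elf_num*mult; if houses[house_index] >= num_presents and house_index < lowest_index: ...'
-- (house_index is provably in range, so List.getD/List.set at house_index.toNat are exact)
def pvAInner (num_presents elf_gift_multiplier elf_num : Int) (st : List Int × Int) (house_index : Int) : List Int × Int :=
  let v := st.1.getD house_index.toNat 0 + elf_num * elf_gift_multiplier
  (st.1.set house_index.toNat v, if num_presents ≤ v ∧ house_index < st.2 then house_index else st.2)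

-- one iteration of 'for elf_num in range(1, len(houses)+1)'
def pvAElf (num_presents : Int) (elf_house_limit : Option Int) (elf_gift_multiplier : Int) (st : List Int × Int) (elf_num : Int) : List Int × Int :=
  let elf_house_max : Int := match elf_house_limit with
    | none => (st.1.length : Int)
    | some l => min ((st.1.length : Int)) ((elf_num - 1) + elf_num * l)
  (PySem.List.pyRange (elf_num - 1) elf_house_max elf_num).foldl (pvAInner num_presents elf_gift_multiplier elf_num) st

def lowest_numbered_house_to_get_presents (num_presents : Int) (elf_house_limit : Option Int) (elf_gift_multiplier : Int) : Int :=
  let houses : List Int := List.replicate (PySem.Int.floordiv (PySem.Int.floordiv num_presents elf_gift_multiplier) 2).toNat 0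
  let st := (PySem.List.pyRange 1 ((houses.length : Int) + 1) 1).foldl
    (pvAElf num_presents elf_house_limit elf_gift_multiplier) (houses, (houses.length : Int))
  st.2 + 1

-- ===== PORT B =====
-- 'elf_house_limit is None or house // elf <= elf_house_limit'
def pvBCond (elf_house_limit : Option Int) (house elf : Int) : Bool :=
  match elf_house_limit with
  | none => true
  | some l => decide (PySem.Int.floordiv house elf ≤ l)

-- 'sum(elf * mult for elf in range(1, house+1) if house % elf == 0 and <cond>)'
def pvBPresents (elf_house_limit : Option Int) (elf_gift_multiplier house : Int) : Int :=
  (PySem.List.pyRange 1 (house + 1) 1).foldl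
    (fun acc elf => if PySem.Int.mod house elf = 0 ∧ pvBCond elf_house_limit house elf = true
                    then acc + elf * elf_gift_multiplier else acc) 0

-- 'for house in range(1, cap+1): ... return house' / 'return cap + 1'
def pvBGo (num_presents : Int) (elf_house_limit : Option Int) (elf_gift_multiplier cap house : Int) : Int :=
  if house ≤ cap then
    if num_presents ≤ pvBPresents elf_house_limit elf_gift_multiplier house then house
    else pvBGo num_presents elf_house_limit elf_gift_multiplier cap (house + 1)
  else cap + 1
termination_by (cap + 1 - house).toNat
decreasing_by omega

def lowest_numbered_house_to_get_presents_alt (num_presents : Int) (elf_house_limit : Option Int) (elf_gift_multiplier : Int) : Int :=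
  let cap : Int := max 0 (PySem.Int.floordiv (PySem.Int.floordiv num_presents elf_gift_multiplier) 2)
  pvBGo num_presents elf_house_limit elf_gift_multiplier cap 1

-- ===== PRECONDITION & SPEC =====
-- Pre_ excludes non-positive multipliers: with elf_gift_multiplier = 0 the Python A raises
-- ZeroDivisionError, and with a negative multiplier gift counts are negative and A's running-sum
-- threshold test detects a transient, not the final count — an accident of the sieve's update order.
def Pre_lowest_numbered_house_to_get_presents (num_presents : Int) (elf_house_limit : Option Int) (elf_gift_multiplier : Int) : Prop :=
  1 ≤ elf_gift_multiplier
instance (num_presents : Int) (elf_house_limit : Option Int) (elf_gift_multiplier : Int) : Decidable (Pre_lowest_numbered_house_to_get_presents num_presents elf_house_limit elf_gift_multiplier) := by unfold Pre_lowest_numbered_house_to_get_presents; infer_instance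
def pvWitness_lowest_numbered_house_to_get_presents : Int × Option Int × Int := (100, none, 10)

def Spec_lowest_numbered_house_to_get_presents (num_presents : Int) (elf_house_limit : Option Int) (elf_gift_multiplier : Int) (out : Int) : Prop := out = lowest_numbered_house_to_get_presents_alt num_presents elf_house_limit elf_gift_multiplier
instance (num_presents : Int) (elf_house_limit : Option Int) (elf_gift_multiplier : Int) (out : Int) : Decidable (Spec_lowest_numbered_house_to_get_presents num_presents elf_house_limit elf_gift_multiplier out) := by unfold Spec_lowest_numbered_house_to_get_presents; infer_instance

-- ===== CLAIM (what is proved, stated in full; the proofs are below) =====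
def Claim_equal_lowest_numbered_house_to_get_presents : Prop := ∀ (num_presents : Int) (elf_house_limit : Option Int) (elf_gift_multiplier : Int), Dom_lowest_numbered_house_to_get_presents num_presents elf_house_limit elf_gift_multiplier → Pre_lowest_numbered_house_to_get_presents num_presents elf_house_limit elf_gift_multiplier → Spec_lowest_numbered_house_to_get_presents num_presents elf_house_limit elf_gift_multiplier (lowest_numbered_house_to_get_presents num_presents elf_house_limit elf_gift_multiplier)

-- ===== LEMMAS AND PROOFS =====

-- 'elf k serves house h (0-based) within the limit' (h < size is checked separately)
def pvVisitB (elf_house_limit : Option Int) (h : Nat) (k : Int) : Bool :=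
  match elf_house_limit with
  | none => true
  | some l => decide ((h : Int) < (k - 1) + k * l)

-- presents on house h (0-based) after elves 1..E have run
def pvPartial (elf_house_limit : Option Int) (m : Int) (h : Nat) (E : Nat) : Int :=
  ((List.range E).map (fun (k0 : Nat) =>
    if PySem.Int.mod ((h : Int) + 1) ((k0 : Int) + 1) = 0 ∧ pvVisitB elf_house_limit h ((k0 : Int) + 1) = true
    then ((k0 : Int) + 1) * m else 0)).sum

-- x is A's running minimum after elves 1..E: lower bound of all qualifying houses, and itself size or qualifying
def pvIsLow (np : Int) (lim : Option Int) (m : Int) (size E : Nat) (x : Int) : Prop :=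
  (∀ h : Nat, h < size → np ≤ pvPartial lim m h E → x ≤ (h : Int)) ∧
  (x = (size : Int) ∨ ∃ h : Nat, h < size ∧ x = (h : Int) ∧ np ≤ pvPartial lim m h E)

lemma pvIsLow_unique {np : Int} {lim : Option Int} {m : Int} {size E : Nat} {x y : Int}
    (hx : pvIsLow np lim m size E x) (hy : pvIsLow np lim m size E y) : x = y := by
  obtain ⟨hx1, hx2⟩ := hx
  obtain ⟨hy1, hy2⟩ := hy
  rcases hx2 with hx2 | ⟨h1, hh1, hx2, hq1⟩ <;> rcases hy2 with hy2 | ⟨h2, hh2, hy2, hq2⟩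
  · omega
  · have := hx1 h2 hh2 hq2; omega
  · have := hy1 h1 hh1 hq1; omega
  · have := hx1 h2 hh2 hq2; have := hy1 h1 hh1 hq1; omega

lemma pvPairwise_pyRange_pos (a b s : Int) (hs : 0 < s) :
    (PySem.List.pyRange a b s).Pairwise (· < ·) := by
  rw [PySem.List.pyRange_of_pos a b hs]
  refine List.Pairwise.map _ (fun k1 k2 (h : k1 < k2) => ?_) List.pairwise_lt_range
  have : (k1 : Int) < (k2 : Int) := by exact_mod_cast h
  nlinarith

lemma pvPartial_succ (lim : Option Int) (m : Int) (h E : Nat) :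
    pvPartial lim m h (E + 1) = pvPartial lim m h E +
      (if PySem.Int.mod ((h : Int) + 1) ((E : Int) + 1) = 0 ∧ pvVisitB lim h ((E : Int) + 1) = true
       then ((E : Int) + 1) * m else 0) := by
  simp [pvPartial, List.range_succ]

lemma pvPartial_mono_succ (lim : Option Int) {m : Int} (hm : 1 ≤ m) (h E : Nat) :
    pvPartial lim m h E ≤ pvPartial lim m h (E + 1) := by
  rw [pvPartial_succ]
  have : (0:Int) ≤ ((E : Int) + 1) * m := by positivity
  split_ifs <;> omega

lemma pvAInner_foldl (np m elf : Int) (idxs : List Int) : ∀ (st : List Int × Int),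
    idxs.Pairwise (· < ·) →
    (∀ i ∈ idxs, 0 ≤ i ∧ i < (st.1.length : Int)) →
    (idxs.foldl (pvAInner np m elf) st).1.length = st.1.length
    ∧ (∀ j : Nat, (idxs.foldl (pvAInner np m elf) st).1.getD j 0
        = st.1.getD j 0 + (if (j : Int) ∈ idxs then elf * m else 0))
    ∧ (idxs.foldl (pvAInner np m elf) st).2
        = (match idxs.filter (fun i => decide (np ≤ st.1.getD i.toNat 0 + elf * m)) with
           | [] => st.2
           | i :: _ => min st.2 i) := by
  induction idxs with
  | nil =>
    intro st _ _
    exact ⟨rfl, fun j => by simp, rfl⟩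
  | cons i rest ih =>
    intro st hpw hbd
    obtain ⟨hpw_head, hpw_tail⟩ := List.pairwise_cons.1 hpw
    obtain ⟨hi0, hilen⟩ := hbd i List.mem_cons_self
    have hiN : i.toNat < st.1.length := by omega
    have hiI : (i.toNat : Int) = i := by omega
    set v := st.1.getD i.toNat 0 + elf * m with hv
    have hst' : pvAInner np m elf st i
        = (st.1.set i.toNat v, if np ≤ v ∧ i < st.2 then i else st.2) := rfl
    have hrest_ne : ∀ i' ∈ rest, i < i' := fun i' h => hpw_head i' h
    have hbd' : ∀ i' ∈ rest, 0 ≤ i' ∧ i' < (((st.1.set i.toNat v)).length : Int) := by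
      intro i' h
      have := hbd i' (List.mem_cons_of_mem _ h)
      simpa [List.length_set] using this
    rw [List.foldl_cons, hst']
    obtain ⟨ih1, ih2, ih3⟩ := ih (st.1.set i.toNat v, if np ≤ v ∧ i < st.2 then i else st.2) hpw_tail hbd'
    dsimp only at ih1 ih2 ih3
    have hgetne : ∀ i' ∈ rest, (st.1.set i.toNat v).getD i'.toNat 0 = st.1.getD i'.toNat 0 := by
      intro i' h
      have hlt : i < i' := hrest_ne i' h
      have : i.toNat ≠ i'.toNat := by omega
      rw [List.getD_eq_getElem?_getD, List.getElem?_set_ne this, ← List.getD_eq_getElem?_getD]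
    refine ⟨by rw [ih1]; exact List.length_set, ?_, ?_⟩
    · -- values
      intro j
      rw [ih2 j]
      by_cases hji : (j : Int) = i
      · have hj : j = i.toNat := by omega
        subst hj
        have hnotmem : ((i.toNat : Int) ∉ rest) := by
          rw [hiI]; intro hmem; exact absurd (hrest_ne i hmem) (lt_irrefl i)
        rw [if_neg hnotmem, if_pos (by rw [hiI]; exact List.mem_cons_self)]
        rw [List.getD_eq_getElem?_getD, List.getElem?_set_self hiN]
        simp [hv]
      · have hne : i.toNat ≠ j := by omega
        rw [List.getD_eq_getElem?_getD, List.getElem?_set_ne hne, ← List.getD_eq_getElem?_getD]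
        have hmem : ((j : Int) ∈ i :: rest) ↔ ((j : Int) ∈ rest) := by
          simp [List.mem_cons, hji]
        by_cases hjr : (j : Int) ∈ rest
        · rw [if_pos hjr, if_pos (hmem.2 hjr)]
        · rw [if_neg hjr, if_neg (fun h => hjr (hmem.1 h))]
    · -- running minimum
      have hfeq : rest.filter (fun i' => decide (np ≤ (st.1.set i.toNat v).getD i'.toNat 0 + elf * m))
          = rest.filter (fun i' => decide (np ≤ st.1.getD i'.toNat 0 + elf * m)) := by
        apply List.filter_congr
        intro i' h
        rw [hgetne i' h]
      rw [ih3, hfeq, List.filter_cons]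
      by_cases hq : np ≤ st.1.getD i.toNat 0 + elf * m
      · have hd : decide (np ≤ st.1.getD i.toNat 0 + elf * m) = true := decide_eq_true hq
        rw [hd, if_pos rfl]
        have hlov : (if np ≤ v ∧ i < st.2 then i else st.2) = min st.2 i := by
          rcases le_total st.2 i with hc | hc
          · rw [if_neg (fun hcc => absurd hcc.2 (by omega)), min_eq_left hc]
          · rcases lt_or_eq_of_le hc with hc' | hc'
            · rw [if_pos ⟨hq, hc'⟩, min_eq_right hc]
            · rw [hc']; simp
        rw [hlov]
        cases hF : rest.filter (fun i' => decide (np ≤ st.1.getD i'.toNat 0 + elf * m)) with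
        | nil => rfl
        | cons i1 tl =>
          have hi1 : i1 ∈ rest := by
            have hmem1 : i1 ∈ rest.filter (fun i' => decide (np ≤ st.1.getD i'.toNat 0 + elf * m)) := by
              rw [hF]; exact List.mem_cons_self
            exact (List.mem_filter.1 hmem1).1
          have hii1 : i < i1 := hrest_ne i1 hi1
          show min (min st.2 i) i1 = min st.2 i
          rcases le_total st.2 i with hc | hc <;> simp [min_def] <;> omega
      · have hd : decide (np ≤ st.1.getD i.toNat 0 + elf * m) = false := decide_eq_false hq
        rw [hd]
        simp only [Bool.false_eq_true, if_false]
        have hlov : (if np ≤ v ∧ i < st.2 then i else st.2) = st.2 := by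
          rw [if_neg (fun hcc => hq hcc.1)]
        rw [hlov]

lemma pvOuter (np : Int) (lim : Option Int) (m : Int) (hm : 1 ≤ m) (hnp : 1 ≤ np) (size : Nat) :
    ∀ E : Nat,
    ((PySem.List.pyRange 1 ((E : Int) + 1) 1).foldl (pvAElf np lim m)
        (List.replicate size 0, (size : Int))).1.length = size
    ∧ (∀ h : Nat, h < size →
        ((PySem.List.pyRange 1 ((E : Int) + 1) 1).foldl (pvAElf np lim m)
          (List.replicate size 0, (size : Int))).1.getD h 0 = pvPartial lim m h E)
    ∧ pvIsLow np lim m size E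
        (((PySem.List.pyRange 1 ((E : Int) + 1) 1).foldl (pvAElf np lim m)
          (List.replicate size 0, (size : Int))).2) := by
  intro E
  induction E with
  | zero =>
    rw [show ((0 : Nat) : Int) + 1 = 1 by norm_num, PySem.List.pyRange_one_eq_nil (le_refl 1),
        List.foldl_nil]
    refine ⟨List.length_replicate, fun h hh => ?_, fun h hh hq => ?_, Or.inl rfl⟩
    · show (List.replicate size (0:Int)).getD h 0 = _
      rw [List.getD_replicate _ hh]
      simp [pvPartial]
    · exfalso
      simp only [pvPartial, List.range_zero, List.map_nil, List.sum_nil] at hq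
      omega
  | succ E ih =>
    obtain ⟨ih1, ih2, ih3⟩ := ih
    have hcast : ((E + 1 : Nat) : Int) = (E : Int) + 1 := by push_cast; ring
    rw [hcast, PySem.List.pyRange_one_succ_right (by omega), List.foldl_append, List.foldl_cons,
        List.foldl_nil]
    set st := (PySem.List.pyRange 1 ((E : Int) + 1) 1).foldl (pvAElf np lim m)
        (List.replicate size 0, (size : Int)) with hst
    set elf : Int := (E : Int) + 1 with helf_def
    have helf : 0 < elf := by omega
    set ehmD : Int := (match lim with
      | none => (size : Int)
      | some l => min (size : Int) ((elf - 1) + elf * l)) with hehm_def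
    have hAElf : pvAElf np lim m st elf
        = (PySem.List.pyRange (elf - 1) ehmD elf).foldl (pvAInner np m elf) st := by
      cases lim <;> simp only [pvAElf, ih1, hehm_def]
    have hehm_le : ehmD ≤ (size : Int) := by
      cases lim <;> simp [hehm_def] 
    set idxs := PySem.List.pyRange (elf - 1) ehmD elf with hidxs
    have hbdmem : ∀ i ∈ idxs, 0 ≤ i ∧ i < (size : Int) := by
      intro i hi
      obtain ⟨h1, h2, -⟩ := (PySem.List.mem_pyRange_iff_of_pos helf i).1 hi
      exact ⟨by omega, by omega⟩
    have hbd : ∀ i ∈ idxs, 0 ≤ i ∧ i < (st.1.length : Int) := by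
      intro i hi
      have := hbdmem i hi
      omega
    obtain ⟨f1, f2, f3⟩ := pvAInner_foldl np m elf idxs st
      (pvPairwise_pyRange_pos _ _ _ helf) hbd
    have hmem : ∀ h : Nat, h < size →
        (((h : Int) ∈ idxs) ↔ (PySem.Int.mod ((h : Int) + 1) elf = 0 ∧ pvVisitB lim h elf = true)) := by
      intro h hh
      rw [hidxs, PySem.List.mem_pyRange_iff_of_pos helf]
      have hdvd_iff : (elf ∣ (h : Int) - (elf - 1)) ↔ (elf ∣ (h : Int) + 1) := by
        constructor
        · intro hd
          have := dvd_add hd (dvd_refl elf)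
          simpa [sub_add_cancel, show (h : Int) - (elf - 1) + elf = (h : Int) + 1 by ring] using this
        · intro hd
          have := dvd_sub hd (dvd_refl elf)
          simpa [show (h : Int) + 1 - elf = (h : Int) - (elf - 1) by ring] using this
      rw [hdvd_iff, ← PySem.Int.mod_eq_zero_iff_dvd]
      have hvisit_iff : ((h : Int) < ehmD) ↔ (pvVisitB lim h elf = true) := by
        cases lim with
        | none => simp [hehm_def, pvVisitB]; omega
        | some l =>
          simp only [hehm_def, pvVisitB, lt_min_iff, decide_eq_true_eq]
          constructor
          · exact fun hx => hx.2
          · exact fun hx => ⟨by omega, hx⟩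
      constructor
      · rintro ⟨-, h2, h3⟩
        exact ⟨h3, hvisit_iff.1 h2⟩
      · rintro ⟨h1, h2⟩
        have hdd : elf ∣ (h : Int) + 1 := (PySem.Int.mod_eq_zero_iff_dvd _ _).1 h1
        have : elf ≤ (h : Int) + 1 := Int.le_of_dvd (by omega) hdd
        exact ⟨by omega, hvisit_iff.2 h2, h1⟩
    rw [hAElf]
    refine ⟨f1.trans ih1, ?_, ?_⟩
    · -- values
      intro h hh
      rw [f2 h, ih2 h hh, pvPartial_succ]
      by_cases hmm : (h : Int) ∈ idxs
      · rw [if_pos hmm, if_pos ((hmem h hh).1 hmm)]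
      · rw [if_neg hmm, if_neg (fun c => hmm ((hmem h hh).2 c))]
    · -- running minimum is the least qualifying house
      rw [f3]
      have hq_iff : ∀ i ∈ idxs, ((decide (np ≤ st.1.getD i.toNat 0 + elf * m)) = true
          ↔ np ≤ pvPartial lim m i.toNat (E + 1)) := by
        intro i hi
        obtain ⟨hi0, hisz⟩ := hbdmem i hi
        have hiN : i.toNat < size := by omega
        have hiI : ((i.toNat : Nat) : Int) = i := by omega
        have hcond : PySem.Int.mod ((i.toNat : Int) + 1) elf = 0 ∧ pvVisitB lim i.toNat elf = true :=
          (hmem i.toNat hiN).1 (by rw [hiI]; exact hi)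
        rw [decide_eq_true_eq, ih2 i.toNat hiN, pvPartial_succ, if_pos hcond]
      obtain ⟨ihlow1, ihlow2⟩ := ih3
      have hFpw : (idxs.filter (fun i => decide (np ≤ st.1.getD i.toNat 0 + elf * m))).Pairwise (· < ·) :=
        List.Pairwise.filter _ (pvPairwise_pyRange_pos _ _ _ helf)
      constructor
      · -- lower bound
        intro h hh hqp
        by_cases hmm : (h : Int) ∈ idxs
        · have hinF : (h : Int) ∈ idxs.filter (fun i => decide (np ≤ st.1.getD i.toNat 0 + elf * m)) := by
            rw [List.mem_filter]
            refine ⟨hmm, ?_⟩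
            rw [hq_iff _ hmm]
            simpa using hqp
          cases hF : idxs.filter (fun i => decide (np ≤ st.1.getD i.toNat 0 + elf * m)) with
          | nil => rw [hF] at hinF; simp at hinF
          | cons i1 tl =>
            rw [hF] at hinF hFpw
            have : i1 ≤ (h : Int) := by
              rcases List.mem_cons.1 hinF with hcs | hcs
              · omega
              · have := (List.pairwise_cons.1 hFpw).1 _ hcs
                omega
            show min st.2 i1 ≤ (h : Int)
            rcases le_total st.2 i1 with hc | hc
            · rw [min_eq_left hc]; omega
            · rw [min_eq_right hc]; omega
        · have hsame : pvPartial lim m h (E + 1) = pvPartial lim m h E := by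
            rw [pvPartial_succ, if_neg (fun c => hmm ((hmem h hh).2 c)), add_zero]
          have hle : st.2 ≤ (h : Int) := ihlow1 h hh (by rw [← hsame]; exact hqp)
          cases hF : idxs.filter (fun i => decide (np ≤ st.1.getD i.toNat 0 + elf * m)) with
          | nil => exact hle
          | cons i1 tl =>
            show min st.2 i1 ≤ (h : Int)
            rcases le_total st.2 i1 with hc | hc
            · rw [min_eq_left hc]; omega
            · rw [min_eq_right hc]; omega
      · -- the minimum itself is size or a qualifying house
        cases hF : idxs.filter (fun i => decide (np ≤ st.1.getD i.toNat 0 + elf * m)) with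
        | nil =>
          rcases ihlow2 with hsz | ⟨h, hh, hx, hq⟩
          · exact Or.inl hsz
          · exact Or.inr ⟨h, hh, hx, le_trans hq (pvPartial_mono_succ lim hm h E)⟩
        | cons i1 tl =>
          have hi1F : i1 ∈ idxs.filter (fun i => decide (np ≤ st.1.getD i.toNat 0 + elf * m)) := by
            rw [hF]; exact List.mem_cons_self
          obtain ⟨hi1idxs, hi1q⟩ := List.mem_filter.1 hi1F
          obtain ⟨hi10, hi1sz⟩ := hbdmem i1 hi1idxs
          have hi1qual : np ≤ pvPartial lim m i1.toNat (E + 1) := (hq_iff i1 hi1idxs).1 hi1q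
          rcases le_total st.2 i1 with hc | hc
          · rcases ihlow2 with hsz | ⟨h, hh, hx, hq⟩
            · exfalso; omega
            · refine Or.inr ⟨h, hh, ?_, le_trans hq (pvPartial_mono_succ lim hm h E)⟩
              show min st.2 i1 = (h : Int)
              rw [min_eq_left hc]; omega
          · refine Or.inr ⟨i1.toNat, by omega, ?_, hi1qual⟩
            show min st.2 i1 = ((i1.toNat : Nat) : Int)
            rw [min_eq_right hc]; omega

lemma pvPartial_stable (lim : Option Int) (m : Int) (h : Nat) :
    ∀ E : Nat, h + 1 ≤ E → pvPartial lim m h E = pvPartial lim m h (h + 1) := by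
  intro E
  induction E with
  | zero => omega
  | succ E ih =>
    intro hE
    rcases Nat.lt_or_ge h (E) with hlt | hge
    · rw [pvPartial_succ, ih (by omega), if_neg]
      · ring
      · rintro ⟨hmod, -⟩
        have hk : (0 : Int) < (E : Int) + 1 := by positivity
        rw [PySem.Int.mod_eq_emod_of_pos hk, Int.emod_eq_of_lt (by omega) (by omega)] at hmod
        omega
    · have : E = h := by omega
      subst this
      rfl

lemma pvPres_eq_partial (lim : Option Int) (m : Int) (size h : Nat) (hh : h < size) :
    pvBPresents lim m ((h : Int) + 1) = pvPartial lim m h size := by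
  unfold pvBPresents
  rw [PySem.List.foldl_congr_mem _ _
      (fun acc elf => acc +
        (if PySem.Int.mod ((h : Int) + 1) elf = 0 ∧ pvBCond lim ((h : Int) + 1) elf = true
         then elf * m else 0)) _
      (by intro acc x _
          by_cases c : PySem.Int.mod ((h : Int) + 1) x = 0 ∧ pvBCond lim ((h : Int) + 1) x = true
          · simp only []
            rw [if_pos c, if_pos c]
          · simp only []
            rw [if_neg c, if_neg c, add_zero])]
  rw [PySem.List.foldl_add, PySem.List.pyRange_one, List.map_map]
  have ht : ((h : Int) + 1 + 1 - 1).toNat = h + 1 := by omega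
  rw [ht]
  rw [pvPartial_stable lim m h size (by omega)]
  unfold pvPartial
  rw [zero_add]
  apply congrArg List.sum
  apply List.map_congr_left
  intro k0 hk0
  simp only [Function.comp_apply]
  have e1 : (1 : Int) + (k0 : Int) = (k0 : Int) + 1 := by ring
  rw [e1]
  by_cases hm0 : PySem.Int.mod ((h : Int) + 1) ((k0 : Int) + 1) = 0
  · have hk : (0 : Int) < (k0 : Int) + 1 := by positivity
    have hcond : pvBCond lim ((h : Int) + 1) ((k0 : Int) + 1) = pvVisitB lim h ((k0 : Int) + 1) := by
      cases lim with
      | none => rfl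
      | some l =>
        simp only [pvBCond, pvVisitB, decide_eq_decide]
        have hdvd : ((k0 : Int) + 1) ∣ ((h : Int) + 1) := (PySem.Int.mod_eq_zero_iff_dvd _ _).1 hm0
        obtain ⟨q, hq⟩ := hdvd
        have hfd : PySem.Int.floordiv ((h : Int) + 1) ((k0 : Int) + 1) = q := by
          rw [PySem.Int.floordiv_eq_ediv_of_pos hk, hq, Int.mul_ediv_cancel_left _ (ne_of_gt hk)]
        rw [hfd]
        constructor
        · intro hql; nlinarith
        · intro hh2
          have hlt : ((k0 : Int) + 1) * q < ((k0 : Int) + 1) * (l + 1) := by nlinarith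
          have := lt_of_mul_lt_mul_left hlt (le_of_lt hk)
          omega
    rw [hcond]
  · rw [if_neg (by rintro ⟨c, -⟩; exact hm0 c), if_neg (by rintro ⟨c, -⟩; exact hm0 c)]

lemma pvFind_pyRange_spec (p : Int → Bool) : ∀ (a b : Int),
    (∀ H, (PySem.List.pyRange a b 1).find? p = some H →
      (a ≤ H ∧ H < b ∧ p H = true ∧ ∀ y, a ≤ y → y < H → p y = false)) ∧
    ((PySem.List.pyRange a b 1).find? p = none → ∀ y, a ≤ y → y < b → p y = false) := by
  suffices main : ∀ n : Nat, ∀ a b : Int, (b - a).toNat = n →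
      (∀ H, (PySem.List.pyRange a b 1).find? p = some H →
        (a ≤ H ∧ H < b ∧ p H = true ∧ ∀ y, a ≤ y → y < H → p y = false)) ∧
      ((PySem.List.pyRange a b 1).find? p = none → ∀ y, a ≤ y → y < b → p y = false) by
    exact fun a b => main _ a b rfl
  intro n
  induction n with
  | zero =>
    intro a b hn
    rw [PySem.List.pyRange_one_eq_nil (by omega)]
    refine ⟨fun H h => by simp at h, fun _ y hy1 hy2 => by omega⟩
  | succ n ih =>
    intro a b hn
    have hab : a < b := by omega
    rw [PySem.List.pyRange_one_cons hab]
    by_cases hp : p a = true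
    · rw [List.find?_cons_of_pos hp]
      refine ⟨fun H h => ?_, fun h => by simp at h⟩
      obtain rfl : a = H := by simpa using h
      exact ⟨le_refl a, hab, hp, fun y hy1 hy2 => by omega⟩
    · rw [List.find?_cons_of_neg hp]
      obtain ⟨ih1, ih2⟩ := ih (a + 1) b (by omega)
      refine ⟨fun H h => ?_, fun h y hy1 hy2 => ?_⟩
      · obtain ⟨h1, h2, h3, h4⟩ := ih1 H h
        refine ⟨by omega, h2, h3, fun y hy1 hy2 => ?_⟩
        rcases eq_or_lt_of_le hy1 with rfl | hy1'
        · simpa using hp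
        · exact h4 y (by omega) hy2
      · rcases eq_or_lt_of_le hy1 with rfl | hy1'
        · simpa using hp
        · exact ih2 h y (by omega) hy2

lemma pvBGo_eq_find (np : Int) (lim : Option Int) (m cap : Int) : ∀ house : Int,
    pvBGo np lim m cap house
      = ((PySem.List.pyRange house (cap + 1) 1).find?
          (fun H => decide (np ≤ pvBPresents lim m H))).getD (cap + 1) := by
  suffices main : ∀ n : Nat, ∀ house : Int, (cap + 1 - house).toNat = n →
      pvBGo np lim m cap house
        = ((PySem.List.pyRange house (cap + 1) 1).find?
            (fun H => decide (np ≤ pvBPresents lim m H))).getD (cap + 1) by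
    exact fun house => main _ house rfl
  intro n
  induction n with
  | zero =>
    intro house hn
    rw [pvBGo, if_neg (by omega), PySem.List.pyRange_one_eq_nil (by omega)]
    simp
  | succ n ih =>
    intro house hn
    have hh : house ≤ cap := by omega
    rw [pvBGo, if_pos hh, PySem.List.pyRange_one_cons (by omega)]
    by_cases hp : np ≤ pvBPresents lim m house
    · rw [if_pos hp, List.find?_cons_of_pos (by simpa using hp)]
      simp
    · rw [if_neg hp, List.find?_cons_of_neg (by simpa using hp)]
      exact ih (house + 1) (by omega)

-- ===== VERDICT (by name: the statement is the Claim_ definition above) =====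
theorem lowest_numbered_house_to_get_presents_spec : Claim_equal_lowest_numbered_house_to_get_presents := by
  intro np lim m _dom hpre
  have hm : 1 ≤ m := hpre
  unfold Spec_lowest_numbered_house_to_get_presents
  set c : Int := PySem.Int.floordiv (PySem.Int.floordiv np m) 2 with hc
  have hA : lowest_numbered_house_to_get_presents np lim m
      = ((PySem.List.pyRange 1 ((c.toNat : Int) + 1) 1).foldl (pvAElf np lim m)
          (List.replicate c.toNat 0, (c.toNat : Int))).2 + 1 := by
    simp only [lowest_numbered_house_to_get_presents, List.length_replicate, hc]
  have hB : lowest_numbered_house_to_get_presents_alt np lim m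
      = pvBGo np lim m (max 0 c) 1 := by
    simp only [lowest_numbered_house_to_get_presents_alt, hc]
  rw [hA, hB]
  by_cases hcpos : c ≤ 0
  · -- no houses at all: both return 1
    have h0 : c.toNat = 0 := by omega
    rw [h0, max_eq_left hcpos]
    rw [show ((0 : Nat) : Int) + 1 = 1 by norm_num, PySem.List.pyRange_one_eq_nil (le_refl 1),
        List.foldl_nil, pvBGo, if_neg (by omega)]
    simp
  · -- at least one house
    set size : Nat := c.toNat with hsize
    have hszc : (size : Int) = c := by omega
    have h2 : 2 ≤ PySem.Int.floordiv np m := by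
      have h12 := (PySem.Int.le_floordiv_iff_mul_le
        (a := PySem.Int.floordiv np m) (b := 2) (q := 1) (by omega)).1 (by omega)
      omega
    have hnp2 : 2 * m ≤ np :=
      (PySem.Int.le_floordiv_iff_mul_le (a := np) (b := m) (q := 2) (by omega)).1 h2
    have hnp : 1 ≤ np := by omega
    obtain ⟨a1, a2, alow⟩ := pvOuter np lim m hm hnp size size
    rw [max_eq_right (show (0 : Int) ≤ c by omega), show c = ((size : Nat) : Int) by omega]
    rw [pvBGo_eq_find np lim m ((size : Int)) 1]
    obtain ⟨fs, fn⟩ := pvFind_pyRange_spec (fun H => decide (np ≤ pvBPresents lim m H)) 1 ((size : Int) + 1)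
    cases hfind : (PySem.List.pyRange 1 ((size : Int) + 1) 1).find?
        (fun H => decide (np ≤ pvBPresents lim m H)) with
    | some H =>
      obtain ⟨hH1, hH2, hH3, hHfirst⟩ := fs H hfind
      have hH3' : np ≤ pvBPresents lim m H := by simpa using hH3
      have hlowB : pvIsLow np lim m size size (H - 1) := by
        constructor
        · intro h hh hq
          have hpres : np ≤ pvBPresents lim m ((h : Int) + 1) := by
            rw [pvPres_eq_partial lim m size h hh]; exact hq
          by_contra hcon
          have hfirst := hHfirst ((h : Int) + 1) (by omega) (by omega)
          rw [decide_eq_false_iff_not] at hfirst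
          exact hfirst hpres
        · refine Or.inr ⟨(H - 1).toNat, by omega, by omega, ?_⟩
          have hcast : (((H - 1).toNat : Nat) : Int) + 1 = H := by omega
          rw [← pvPres_eq_partial lim m size (H - 1).toNat (by omega), hcast]
          exact hH3'
      have := pvIsLow_unique alow hlowB
      simp only [Option.getD_some]
      omega
    | none =>
      have hnone := fn hfind
      have hlowB : pvIsLow np lim m size size ((size : Int)) := by
        constructor
        · intro h hh hq
          have hpres : np ≤ pvBPresents lim m ((h : Int) + 1) := by
            rw [pvPres_eq_partial lim m size h hh]; exact hq
          have := hnone ((h : Int) + 1) (by omega) (by omega)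
          rw [decide_eq_false_iff_not] at this
          exact absurd hpres this
        · exact Or.inl rfl
      have := pvIsLow_unique alow hlowB
      simp only [Option.getD_none]
      omega
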